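-- pv_equiv track=rewrite | github.com/axelbos/RFQ | RFQ_GIT.py | group_elevators_by_keys
-- ===== SOURCE A (Python) =====
-- from collections import defaultdict
--
-- def group_elevators_by_keys(elevators, keys):
--     grouped = defaultdict(list)
--     for elevator in elevators:
--         group_key = tuple(elevator.get(k, "") for k in keys)
--         grouped[group_key].append(elevator)
--
--     result = []
--     for group in grouped.values():
--         base = group[0].copy()
--         base["hissbeteckning"] = ", ".join(
--             e.get("general_information", "").split()[0].upper()
--             for e in group if e.get("general_information")
--         )
--         base["antal_hissar"] = str(len(group))
--         for k in keys:
--             base[k] = group[0].get(k, "")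
--         result.append(base)
--     return result
-- ===== SOURCE B (Python) =====
-- def group_elevators_by_keys(elevators, keys):
--     # one pass: aggregate (first elevator, token list, count) per key online
--     agg = {}
--     for elevator in elevators:
--         group_key = tuple(elevator.get(k, "") for k in keys)
--         gi = elevator.get("general_information", "")
--         tokens = [gi.split()[0].upper()] if gi else []
--         if group_key in agg:
--             first, parts, count = agg[group_key]
--             agg[group_key] = (first, parts + tokens, count + 1)
--         else:
--             agg[group_key] = (elevator, tokens, 1)
--     result = []
--     for first, parts, count in agg.values():
--         base = dict(first)
--         base["hissbeteckning"] = ", ".join(parts)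
--         base["antal_hissar"] = str(count)
--         for k in keys:
--             base[k] = first.get(k, "")
--         result.append(base)
--     return result
-- ===== Notes on version B (the rewrite author's own statement) =====
-- stated objective: alternative
-- what changed: A groups elevators into a dict of member lists and then re-scans each group to build the joined token string, count and key overwrites; B makes a single pass that incrementally maintains (first elevator, uppercased-token list, count) per group key and only finalizes each accumulator, so groups are never materialized or re-traversed.
import Mathlib
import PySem

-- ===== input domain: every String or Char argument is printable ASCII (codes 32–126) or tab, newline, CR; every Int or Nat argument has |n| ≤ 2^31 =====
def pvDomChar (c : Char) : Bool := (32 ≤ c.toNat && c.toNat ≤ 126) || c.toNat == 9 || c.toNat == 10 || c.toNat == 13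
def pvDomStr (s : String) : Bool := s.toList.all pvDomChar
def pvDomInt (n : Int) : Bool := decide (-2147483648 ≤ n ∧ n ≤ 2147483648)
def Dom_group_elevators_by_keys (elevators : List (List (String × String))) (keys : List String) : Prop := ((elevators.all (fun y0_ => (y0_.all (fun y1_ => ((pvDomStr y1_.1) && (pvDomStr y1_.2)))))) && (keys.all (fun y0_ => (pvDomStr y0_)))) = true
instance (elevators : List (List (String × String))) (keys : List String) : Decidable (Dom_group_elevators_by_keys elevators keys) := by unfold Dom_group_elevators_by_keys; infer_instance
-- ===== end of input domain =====

-- B replaces A's group-then-reduce (dict of member lists, then a second scan over each group)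
-- by online incremental aggregation: one pass keeping (first elevator, token list, count) per key.


-- ===== PORT A =====
-- A-side helpers: the body of A's grouping loop and of A's per-group reduction
def gekAStep (keys : List String) (grouped : PySem.Dict (List String) (List (PySem.Dict String String))) (el : List (String × String)) : PySem.Dict (List String) (List (PySem.Dict String String)) :=
  let elevator := PySem.Dict.ofList el
  let group_key := keys.map (fun k => elevator.getD k "")
  grouped.modify group_key [] (· ++ [elevator])

def gekAReduce (keys : List String) (group : List (PySem.Dict String String)) : List (String × String) :=
  let base0 := group.headD PySem.Dict.empty
  let base1 := base0.insert "hissbeteckning"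
    (PySem.Str.join ", "
      ((group.filter (fun e => e.getD "general_information" "" != "")).map
        (fun e => PySem.Str.upper ((PySem.Str.split₀ (e.getD "general_information" "")).headD ""))))
  let base2 := base1.insert "antal_hissar" (PySem.Int.toStr (group.length : Int))
  (keys.foldl (fun b k => b.insert k ((group.headD PySem.Dict.empty).getD k "")) base2).items

def group_elevators_by_keys (elevators : List (List (String × String))) (keys : List String) : List (List (String × String)) :=
  ((elevators.foldl (gekAStep keys) PySem.Dict.empty).values).map (gekAReduce keys)

-- ===== PORT B =====
-- B-side helpers: the body of B's single aggregation pass and of B's finalisation loop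
def gekBStep (keys : List String) (agg : PySem.Dict (List String) (PySem.Dict String String × List String × Int)) (el : List (String × String)) : PySem.Dict (List String) (PySem.Dict String String × List String × Int) :=
  let elevator := PySem.Dict.ofList el
  let group_key := keys.map (fun k => elevator.getD k "")
  let gi := elevator.getD "general_information" ""
  let tokens := if gi != "" then [PySem.Str.upper ((PySem.Str.split₀ gi).headD "")] else []
  match agg.get? group_key with
  | some (first, parts, count) => agg.insert group_key (first, parts ++ tokens, count + 1)
  | none => agg.insert group_key (elevator, tokens, 1)

def gekBFinalize (keys : List String) (t : PySem.Dict String String × List String × Int) : List (String × String) :=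
  let base1 := t.1.insert "hissbeteckning" (PySem.Str.join ", " t.2.1)
  let base2 := base1.insert "antal_hissar" (PySem.Int.toStr t.2.2)
  (keys.foldl (fun b k => b.insert k (t.1.getD k "")) base2).items

def group_elevators_by_keys_alt (elevators : List (List (String × String))) (keys : List String) : List (List (String × String)) :=
  ((elevators.foldl (gekBStep keys) PySem.Dict.empty).values).map (gekBFinalize keys)

-- ===== PRECONDITION & SPEC =====
-- Pre_ excludes elevators whose "general_information" is a non-empty all-whitespace string:
-- there both Pythons raise IndexError on .split()[0] (Python's truthiness test passes but split() is empty).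
def Pre_group_elevators_by_keys (elevators : List (List (String × String))) (keys : List String) : Prop :=
  (elevators.all (fun el =>
    let gi := (PySem.Dict.ofList el).getD "general_information" ""
    gi == "" || !(PySem.Str.split₀ gi).isEmpty)) = true
instance (elevators : List (List (String × String))) (keys : List String) : Decidable (Pre_group_elevators_by_keys elevators keys) := by unfold Pre_group_elevators_by_keys; infer_instance

def pvWitness_group_elevators_by_keys : (List (List (String × String))) × List String :=
  ([[("a", "x 1"), ("general_information", "Hiss 7")], [("a", "x 1")], [("b", "y")]], ["a", "b"])

def Spec_group_elevators_by_keys (elevators : List (List (String × String))) (keys : List String) (out : List (List (String × String))) : Prop := out = group_elevators_by_keys_alt elevators keys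
instance (elevators : List (List (String × String))) (keys : List String) (out : List (List (String × String))) : Decidable (Spec_group_elevators_by_keys elevators keys out) := by unfold Spec_group_elevators_by_keys; infer_instance

-- ===== CLAIM (what is proved, stated in full; the proofs are below) =====
def Claim_equal_group_elevators_by_keys : Prop := ∀ (elevators : List (List (String × String))) (keys : List String), Dom_group_elevators_by_keys elevators keys → Pre_group_elevators_by_keys elevators keys → Spec_group_elevators_by_keys elevators keys (group_elevators_by_keys elevators keys)

-- ===== LEMMAS AND PROOFS =====

-- the per-member token list B accumulates online
def gekTok (e : PySem.Dict String String) : List String :=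
  if e.getD "general_information" "" != "" then [PySem.Str.upper ((PySem.Str.split₀ (e.getD "general_information" "")).headD "")] else []

-- A's group summarised as B's accumulator value
def gekToAgg (g : List (PySem.Dict String String)) : PySem.Dict String String × List String × Int :=
  (g.headD PySem.Dict.empty,
   (g.filter (fun e => e.getD "general_information" "" != "")).map
     (fun e => PySem.Str.upper ((PySem.Str.split₀ (e.getD "general_information" "")).headD "")),
   (g.length : Int))

-- map A's grouping dict to B's aggregation dict
def gekMapD (d : PySem.Dict (List String) (List (PySem.Dict String String))) : PySem.Dict (List String) (PySem.Dict String String × List String × Int) :=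
  PySem.Dict.mk (d.items.map (fun p => (p.1, gekToAgg p.2)))

lemma gekAReduce_eq (keys : List String) (g : List (PySem.Dict String String)) :
    gekAReduce keys g = gekBFinalize keys (gekToAgg g) := rfl

lemma gek_get?_mapD (d : PySem.Dict (List String) (List (PySem.Dict String String))) (k : List String) :
    (gekMapD d).get? k = (d.get? k).map gekToAgg := by
  obtain ⟨items⟩ := d
  induction items with
  | nil => rfl
  | cons p rest ih =>
    obtain ⟨pk, pv⟩ := p
    by_cases h : pk == k
    · simp [gekMapD, PySem.Dict.get?_mk_cons, h]
    · simp only [gekMapD, List.map_cons, PySem.Dict.get?_mk_cons, h] at *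
      simpa [h] using ih

lemma gek_contains_mapD (d : PySem.Dict (List String) (List (PySem.Dict String String))) (k : List String) :
    (gekMapD d).contains k = d.contains k := by
  rw [PySem.Dict.contains_eq_isSome_get?, PySem.Dict.contains_eq_isSome_get?, gek_get?_mapD]
  cases d.get? k <;> rfl

lemma gekMapD_insert (d : PySem.Dict (List String) (List (PySem.Dict String String))) (k : List String) (v : List (PySem.Dict String String)) :
    gekMapD (d.insert k v) = (gekMapD d).insert k (gekToAgg v) := by
  apply PySem.Dict.ext
  have hc : (gekMapD d).contains k = d.contains k := gek_contains_mapD d k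
  by_cases h : d.contains k = true
  · rw [show (gekMapD (d.insert k v)).items = List.map (fun p => (p.1, gekToAgg p.2)) (d.insert k v).items from rfl,
      PySem.Dict.items_insert_of_contains _ _ h,
      PySem.Dict.items_insert_of_contains _ _ (hc.trans h),
      show (gekMapD d).items = List.map (fun p => (p.1, gekToAgg p.2)) d.items from rfl,
      List.map_map, List.map_map]
    apply List.map_congr_left
    intro p _
    by_cases hk : p.1 = k <;> simp [hk]
  · rw [show (gekMapD (d.insert k v)).items = List.map (fun p => (p.1, gekToAgg p.2)) (d.insert k v).items from rfl,
      PySem.Dict.items_insert_of_not_contains _ _ (by simpa using h),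
      PySem.Dict.items_insert_of_not_contains _ _ (by simp [hc]; simpa using h),
      show (gekMapD d).items = List.map (fun p => (p.1, gekToAgg p.2)) d.items from rfl,
      List.map_append]
    rfl

lemma gekToAgg_append (g : List (PySem.Dict String String)) (e : PySem.Dict String String) (hg : g ≠ []) :
    gekToAgg (g ++ [e]) = ((gekToAgg g).1, (gekToAgg g).2.1 ++ gekTok e, (gekToAgg g).2.2 + 1) := by
  simp only [gekToAgg, Prod.mk.injEq, List.filter_append, List.map_append, List.length_append]
  refine ⟨?_, ?_, by push_cast; simp⟩
  · obtain ⟨x, g', rfl⟩ := List.exists_cons_of_ne_nil hg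
    rfl
  · congr 1
    by_cases h : e.getD "general_information" "" != "" <;> simp [gekTok, h]

lemma gekToAgg_singleton (e : PySem.Dict String String) :
    gekToAgg [e] = (e, gekTok e, 1) := by
  by_cases h : e.getD "general_information" "" != "" <;> simp [gekToAgg, gekTok, h]

-- one step of B simulates one step of A through gekMapD
lemma gekStep_sim (keys : List String) (el : List (String × String))
    (d : PySem.Dict (List String) (List (PySem.Dict String String)))
    (hne : ∀ p ∈ d.items, p.2 ≠ []) :
    gekBStep keys (gekMapD d) el = gekMapD (gekAStep keys d el) := by
  simp only [gekBStep, gekAStep, PySem.Dict.modify, gek_get?_mapD]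
  cases hget : d.get? (keys.map (fun k => (PySem.Dict.ofList el).getD k "")) with
  | none =>
    simp only [Option.map_none, gekMapD_insert,
      PySem.Dict.getD_of_get?_eq_none _ _ hget, List.nil_append, gekToAgg_singleton]
    rfl
  | some g =>
    have hg : g ≠ [] := hne _ (PySem.Dict.mem_items_of_get?_eq_some _ hget)
    rcases hagg : gekToAgg g with ⟨f1, p1, c1⟩
    simp only [Option.map_some, gekMapD_insert,
      PySem.Dict.getD_of_get?_eq_some _ _ hget, gekToAgg_append _ _ hg, hagg]
    rfl

lemma gekAStep_nonempty (keys : List String) (el : List (String × String))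
    (d : PySem.Dict (List String) (List (PySem.Dict String String)))
    (hne : ∀ p ∈ d.items, p.2 ≠ []) :
    ∀ p ∈ (gekAStep keys d el).items, p.2 ≠ [] := by
  intro p hp
  simp only [gekAStep, PySem.Dict.modify] at hp
  rcases (PySem.Dict.mem_items_insert _ _ _ _).1 hp with h | ⟨h, _⟩
  · subst h; simp
  · exact hne _ h

lemma gekFold_sim (keys : List String) (l : List (List (String × String)))
    (d : PySem.Dict (List String) (List (PySem.Dict String String)))
    (hne : ∀ p ∈ d.items, p.2 ≠ []) :
    l.foldl (gekBStep keys) (gekMapD d) = gekMapD (l.foldl (gekAStep keys) d) := by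
  induction l generalizing d with
  | nil => rfl
  | cons el rest ih =>
    simp only [List.foldl_cons, gekStep_sim keys el d hne]
    exact ih _ (gekAStep_nonempty keys el d hne)

lemma gek_values_mapD (d : PySem.Dict (List String) (List (PySem.Dict String String))) :
    (gekMapD d).values = d.values.map gekToAgg := by
  simp [gekMapD, PySem.Dict.values, List.map_map]

-- ===== VERDICT (by name: the statement is the Claim_ definition above) =====
theorem group_elevators_by_keys_spec : Claim_equal_group_elevators_by_keys := by
  intro elevators keys _ _
  unfold Spec_group_elevators_by_keys group_elevators_by_keys group_elevators_by_keys_alt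
  have h0 : (PySem.Dict.empty : PySem.Dict (List String) (PySem.Dict String String × List String × Int)) = gekMapD PySem.Dict.empty := rfl
  rw [h0, gekFold_sim keys elevators PySem.Dict.empty (by intro p hp; simp [PySem.Dict.empty] at hp),
    gek_values_mapD, List.map_map]
  apply List.map_congr_left
  intro g _
  exact (gekAReduce_eq keys g).symm
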